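-- pv_equiv track=rewrite | github.com/Chris-McElroy/4x4x4 | board.py | pointsToLine
-- ===== SOURCE A (Python) =====
-- def pointsToLine(p1,p2):
-- 	"""
-- 	Given two points, this will return their line number
-- 	if they're in a line, and -1 if they are not
-- 	"""
--
-- 	line = -1
--
-- 	# make sure points are valid
-- 	for p in p1,p2:
-- 		for v in p:
-- 			if (v < 0 or v > 3):
-- 				return line
--
-- 	# see if they have the same x
-- 	if (p1[0] == p2[0]):
-- 		# see if they have the same y
-- 		if (p1[1] == p2[1]):
-- 			# must be vertical
-- 			if (p1[2] != p2[2]):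
-- 				line = 32 + 4*p1[0] + p1[1]
-- 		# see if they have the same z
-- 		elif (p1[2] == p2[2]):
-- 			# must be in y dir
-- 			line = 16 + 4*p1[2] + p1[0]
-- 		# if both y and z change it must be diagonal
-- 		# see if it's coming from 0,0 or 0,3
-- 		elif (p1[1] == p1[2]):
-- 			# should be coming from 0,0; check
-- 			if (p2[1] == p2[2]):
-- 				line = 48 + p1[0]
-- 		elif (p1[1] == 3 - p1[2]):
-- 			# should be coming from 0,0; check
-- 			if (p2[1] == 3-p2[2]):
-- 				line = 52 + p1[0]
-- 	# see if they have the same y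
-- 	elif (p1[1] == p2[1]):
-- 		# see if they have the same z
-- 		if (p1[2] == p2[2]):
-- 			# must be in x dir
-- 			line = 4*p1[1] + p1[2]
-- 		# if both x and z change it must be diagonal
-- 		# see if it's coming from 0,0 or 0,3
-- 		elif (p1[0] == p1[2]):
-- 			# should be coming from 0,0; check
-- 			if (p2[0] == p2[2]):
-- 				line = 56 + p1[1]
-- 		elif (p1[0] == 3 - p1[2]):
-- 			# should be coming from 0,0; check
-- 			if (p2[0] == 3-p2[2]):
-- 				line = 60 + p1[1]
-- 	# see if they have the same z
-- 	elif (p1[2] == p2[2]):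
-- 		# if both x and y change it must be diagonal
-- 		# see if it's coming from 0,0 or 0,3
-- 		if (p1[0] == p1[1]):
-- 			# should be coming from 0,0; check
-- 			if (p2[0] == p2[1]):
-- 				line = 64 + p1[2]
-- 		elif (p1[0] == 3 - p1[1]):
-- 			# should be coming from 0,0; check
-- 			if (p2[0] == 3-p2[1]):
-- 				line = 68 + p1[2]
-- 	# if all change, must be on a main diagonal
-- 	# diagnoal 1
-- 	elif (p1[0] == p1[1] and p1[0] == p1[2]):
-- 		# check p2
-- 		if (p2[0] == p2[1] and p2[0] == p2[2]):
-- 			line = 72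
-- 	# diagonal 2
-- 	elif (p1[0] == p1[1] and p1[0] == 3 - p1[2]):
-- 		# check p2
-- 		if (p2[0] == p2[1] and p2[0] == 3 - p2[2]):
-- 			line = 73
-- 	# diagonal 3
-- 	elif (p1[0] == 3 - p1[1] and p1[0] == p1[2]):
-- 		# check p2
-- 		if (p2[0] == 3 - p2[1] and p2[0] == p2[2]):
-- 			line = 74
-- 	# diagonal 4
-- 	elif (p1[0] == 3 - p1[1] and p1[0] == 3 - p1[2]):
-- 		# check p2
-- 		if (p2[0] == 3 - p2[1] and p2[0] == 3 - p2[2]):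
-- 			line = 75
--
-- 	return line
-- ===== SOURCE B (Python) =====
-- # B: data-driven -- build the 76 winning lines once, index partner->line by packed
-- # point coordinate, and look the pair up, instead of A's coordinate-comparison cascade.
--
-- def _lines():
--     L = []
--     for y in range(4):
--         for z in range(4):
--             L.append([(x, y, z) for x in range(4)])      # 0..15: x-direction, 4*y+z
--     for z in range(4):
--         for x in range(4):
--             L.append([(x, y, z) for y in range(4)])      # 16..31: y-direction, 16+4*z+x
--     for x in range(4):
--         for y in range(4):
--             L.append([(x, y, z) for z in range(4)])      # 32..47: z-direction, 32+4*x+y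
--     for x in range(4):
--         L.append([(x, t, t) for t in range(4)])          # 48+x
--     for x in range(4):
--         L.append([(x, t, 3 - t) for t in range(4)])      # 52+x
--     for y in range(4):
--         L.append([(t, y, t) for t in range(4)])          # 56+y
--     for y in range(4):
--         L.append([(t, y, 3 - t) for t in range(4)])      # 60+y
--     for z in range(4):
--         L.append([(t, t, z) for t in range(4)])          # 64+z
--     for z in range(4):
--         L.append([(t, 3 - t, z) for t in range(4)])      # 68+z
--     L.append([(t, t, t) for t in range(4)])              # 72
--     L.append([(t, t, 3 - t) for t in range(4)])          # 73
--     L.append([(t, 3 - t, t) for t in range(4)])          # 74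
--     L.append([(t, 3 - t, 3 - t) for t in range(4)])      # 75
--     return L
--
-- _LINES = _lines()
--
-- # for each board point (packed as 16x+4y+z): the list of (partner point, line number)
-- _BY_POINT = [[] for _ in range(64)]
-- for _n, _pts in enumerate(_LINES):
--     for _p in _pts:
--         _i = 16 * _p[0] + 4 * _p[1] + _p[2]
--         _BY_POINT[_i] = _BY_POINT[_i] + [(_q, _n) for _q in _pts if _q != _p]
--
-- def pointsToLine(p1, p2):
--     a, b = tuple(p1), tuple(p2)
--     if a == b:
--         return -1
--     for v in a + b:
--         if v < 0 or v > 3: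
--             return -1
--     for q, n in _BY_POINT[16 * a[0] + 4 * a[1] + a[2]]:
--         if q == b:
--             return n
--     return -1
-- ===== Notes on version B (the rewrite author's own statement) =====
-- stated objective: simpler
-- what changed: Replaces A's hand-written cascade of coordinate-comparison branches by a data-driven scan: build the list of all 76 winning lines once (in line-number order) and return the index of the line containing both (distinct, in-range) points, else -1.
import Mathlib
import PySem

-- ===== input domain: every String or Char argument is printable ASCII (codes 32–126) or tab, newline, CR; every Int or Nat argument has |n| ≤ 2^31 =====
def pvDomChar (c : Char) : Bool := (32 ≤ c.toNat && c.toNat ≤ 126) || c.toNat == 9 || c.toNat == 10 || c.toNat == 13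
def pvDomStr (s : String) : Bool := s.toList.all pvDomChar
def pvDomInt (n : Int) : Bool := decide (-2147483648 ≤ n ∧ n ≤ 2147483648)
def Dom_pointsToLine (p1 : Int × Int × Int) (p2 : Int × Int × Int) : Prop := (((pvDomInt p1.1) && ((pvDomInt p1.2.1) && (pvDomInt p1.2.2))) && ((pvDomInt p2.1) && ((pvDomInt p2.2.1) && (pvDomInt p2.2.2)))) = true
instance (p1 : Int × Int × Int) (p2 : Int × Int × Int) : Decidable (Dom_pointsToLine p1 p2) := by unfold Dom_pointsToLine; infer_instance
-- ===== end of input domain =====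

-- B is data-driven: it builds the 76 winning lines, indexes (partner point, line number) by point,
-- and looks the pair up — an alternative decomposition of A's hand-written branch cascade.

-- ===== PORT A =====
-- A's validity loop ("for p in p1,p2: for v in p: ...") is the .any over the six coordinates.
def pointsToLine (p1 : Int × Int × Int) (p2 : Int × Int × Int) : Int :=
  if [p1.1, p1.2.1, p1.2.2, p2.1, p2.2.1, p2.2.2].any (fun v => v < 0 || v > 3) then
    -1
  else if p1.1 = p2.1 then
    if p1.2.1 = p2.2.1 then
      if p1.2.2 ≠ p2.2.2 then 32 + 4 * p1.1 + p1.2.1 else -1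
    else if p1.2.2 = p2.2.2 then
      16 + 4 * p1.2.2 + p1.1
    else if p1.2.1 = p1.2.2 then
      if p2.2.1 = p2.2.2 then 48 + p1.1 else -1
    else if p1.2.1 = 3 - p1.2.2 then
      if p2.2.1 = 3 - p2.2.2 then 52 + p1.1 else -1
    else -1
  else if p1.2.1 = p2.2.1 then
    if p1.2.2 = p2.2.2 then
      4 * p1.2.1 + p1.2.2
    else if p1.1 = p1.2.2 then
      if p2.1 = p2.2.2 then 56 + p1.2.1 else -1
    else if p1.1 = 3 - p1.2.2 then
      if p2.1 = 3 - p2.2.2 then 60 + p1.2.1 else -1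
    else -1
  else if p1.2.2 = p2.2.2 then
    if p1.1 = p1.2.1 then
      if p2.1 = p2.2.1 then 64 + p1.2.2 else -1
    else if p1.1 = 3 - p1.2.1 then
      if p2.1 = 3 - p2.2.1 then 68 + p1.2.2 else -1
    else -1
  else if p1.1 = p1.2.1 ∧ p1.1 = p1.2.2 then
    if p2.1 = p2.2.1 ∧ p2.1 = p2.2.2 then 72 else -1
  else if p1.1 = p1.2.1 ∧ p1.1 = 3 - p1.2.2 then
    if p2.1 = p2.2.1 ∧ p2.1 = 3 - p2.2.2 then 73 else -1
  else if p1.1 = 3 - p1.2.1 ∧ p1.1 = p1.2.2 then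
    if p2.1 = 3 - p2.2.1 ∧ p2.1 = p2.2.2 then 74 else -1
  else if p1.1 = 3 - p1.2.1 ∧ p1.1 = 3 - p1.2.2 then
    if p2.1 = 3 - p2.2.1 ∧ p2.1 = 3 - p2.2.2 then 75 else -1
  else -1

-- ===== PORT B =====
-- range(4) as Int values
def pvR4 : List Int := [0, 1, 2, 3]

-- _lines(): the 76 winning lines, in line-number order (index = line number)
def pvLines : List (List (Int × Int × Int)) :=
  (pvR4.flatMap fun y => pvR4.map fun z => pvR4.map fun x => (x, y, z)) ++
  (pvR4.flatMap fun z => pvR4.map fun x => pvR4.map fun y => (x, y, z)) ++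
  (pvR4.flatMap fun x => pvR4.map fun y => pvR4.map fun z => (x, y, z)) ++
  (pvR4.map fun x => pvR4.map fun t => (x, t, t)) ++
  (pvR4.map fun x => pvR4.map fun t => (x, t, 3 - t)) ++
  (pvR4.map fun y => pvR4.map fun t => (t, y, t)) ++
  (pvR4.map fun y => pvR4.map fun t => (t, y, 3 - t)) ++
  (pvR4.map fun z => pvR4.map fun t => (t, t, z)) ++
  (pvR4.map fun z => pvR4.map fun t => (t, 3 - t, z)) ++
  [pvR4.map fun t => (t, t, t)] ++
  [pvR4.map fun t => (t, t, 3 - t)] ++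
  [pvR4.map fun t => (t, 3 - t, t)] ++
  [pvR4.map fun t => (t, 3 - t, 3 - t)]

-- _BY_POINT: for each point, packed as 16x+4y+z, the list of (partner point, line number).
-- The packed index is 0..63 here (all stored points have coordinates 0..3), so the .toNat
-- of the Python list-assignment index is exact.
def pvByPoint : List (List ((Int × Int × Int) × Int)) :=
  (PySem.List.enumerate pvLines).foldl
    (fun t e => e.2.foldl
      (fun t p =>
        t.set (16 * p.1 + 4 * p.2.1 + p.2.2).toNat
          (t.getD (16 * p.1 + 4 * p.2.1 + p.2.2).toNat [] ++
            (e.2.filter (fun q => q ≠ p)).map (fun q => (q, e.1))))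
      t)
    (List.replicate 64 [])

-- the final "for q, n in ...: if q == b: return n" loop
def pvScan (entries : List ((Int × Int × Int) × Int)) (b : Int × Int × Int) : Int :=
  match entries with
  | [] => -1
  | (q, n) :: rest => if q = b then n else pvScan rest b

def pointsToLine_alt (p1 : Int × Int × Int) (p2 : Int × Int × Int) : Int :=
  if p1 = p2 then -1
  else if [p1.1, p1.2.1, p1.2.2, p2.1, p2.2.1, p2.2.2].any (fun v => v < 0 || v > 3) then -1
  else
    -- _BY_POINT[16*a[0] + 4*a[1] + a[2]]; the index is in range after the coordinate check,
    -- so the IndexError branch (none) is unreachable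
    match PySem.List.pyGet? pvByPoint (16 * p1.1 + 4 * p1.2.1 + p1.2.2) with
    | some entries => pvScan entries p2
    | none => -1

-- ===== PRECONDITION & SPEC =====
def Spec_pointsToLine (p1 : Int × Int × Int) (p2 : Int × Int × Int) (out : Int) : Prop := out = pointsToLine_alt p1 p2
instance (p1 : Int × Int × Int) (p2 : Int × Int × Int) (out : Int) : Decidable (Spec_pointsToLine p1 p2 out) := by unfold Spec_pointsToLine; infer_instance

-- ===== CLAIM (what is proved, stated in full; the proofs are below) =====
def Claim_equal_pointsToLine : Prop := ∀ (p1 : Int × Int × Int) (p2 : Int × Int × Int), Dom_pointsToLine p1 p2 → Spec_pointsToLine p1 p2 (pointsToLine p1 p2)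

-- ===== LEMMAS AND PROOFS =====

-- if some coordinate is out of 0..3, both programs return -1
theorem pv_out_of_range (p1 p2 : Int × Int × Int)
    (h : ([p1.1, p1.2.1, p1.2.2, p2.1, p2.2.1, p2.2.2].any (fun v => v < 0 || v > 3)) = true) :
    pointsToLine p1 p2 = -1 ∧ pointsToLine_alt p1 p2 = -1 := by
  constructor
  · unfold pointsToLine
    rw [if_pos h]
  · unfold pointsToLine_alt
    by_cases hp : p1 = p2
    · rw [if_pos hp]
    · rw [if_neg hp, if_pos h]

-- proof-only copy of pvByPoint with the index spelled out as a literal,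
-- so that the exhaustive kernel evaluation below is cheap
def pvByPointLit : List (List ((Int × Int × Int) × Int)) := [
  [((1, 0, 0), 0), ((2, 0, 0), 0), ((3, 0, 0), 0), ((0, 1, 0), 16), ((0, 2, 0), 16), ((0, 3, 0), 16), ((0, 0, 1), 32), ((0, 0, 2), 32), ((0, 0, 3), 32), ((0, 1, 1), 48), ((0, 2, 2), 48), ((0, 3, 3), 48), ((1, 0, 1), 56), ((2, 0, 2), 56), ((3, 0, 3), 56), ((1, 1, 0), 64), ((2, 2, 0), 64), ((3, 3, 0), 64), ((1, 1, 1), 72), ((2, 2, 2), 72), ((3, 3, 3), 72)],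
  [((1, 0, 1), 1), ((2, 0, 1), 1), ((3, 0, 1), 1), ((0, 1, 1), 20), ((0, 2, 1), 20), ((0, 3, 1), 20), ((0, 0, 0), 32), ((0, 0, 2), 32), ((0, 0, 3), 32), ((1, 1, 1), 65), ((2, 2, 1), 65), ((3, 3, 1), 65)],
  [((1, 0, 2), 2), ((2, 0, 2), 2), ((3, 0, 2), 2), ((0, 1, 2), 24), ((0, 2, 2), 24), ((0, 3, 2), 24), ((0, 0, 0), 32), ((0, 0, 1), 32), ((0, 0, 3), 32), ((1, 1, 2), 66), ((2, 2, 2), 66), ((3, 3, 2), 66)],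
  [((1, 0, 3), 3), ((2, 0, 3), 3), ((3, 0, 3), 3), ((0, 1, 3), 28), ((0, 2, 3), 28), ((0, 3, 3), 28), ((0, 0, 0), 32), ((0, 0, 1), 32), ((0, 0, 2), 32), ((0, 1, 2), 52), ((0, 2, 1), 52), ((0, 3, 0), 52), ((1, 0, 2), 60), ((2, 0, 1), 60), ((3, 0, 0), 60), ((1, 1, 3), 67), ((2, 2, 3), 67), ((3, 3, 3), 67), ((1, 1, 2), 73), ((2, 2, 1), 73), ((3, 3, 0), 73)],
  [((1, 1, 0), 4), ((2, 1, 0), 4), ((3, 1, 0), 4), ((0, 0, 0), 16), ((0, 2, 0), 16), ((0, 3, 0), 16), ((0, 1, 1), 33), ((0, 1, 2), 33), ((0, 1, 3), 33), ((1, 1, 1), 57), ((2, 1, 2), 57), ((3, 1, 3), 57)],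
  [((1, 1, 1), 5), ((2, 1, 1), 5), ((3, 1, 1), 5), ((0, 0, 1), 20), ((0, 2, 1), 20), ((0, 3, 1), 20), ((0, 1, 0), 33), ((0, 1, 2), 33), ((0, 1, 3), 33), ((0, 0, 0), 48), ((0, 2, 2), 48), ((0, 3, 3), 48)],
  [((1, 1, 2), 6), ((2, 1, 2), 6), ((3, 1, 2), 6), ((0, 0, 2), 24), ((0, 2, 2), 24), ((0, 3, 2), 24), ((0, 1, 0), 33), ((0, 1, 1), 33), ((0, 1, 3), 33), ((0, 0, 3), 52), ((0, 2, 1), 52), ((0, 3, 0), 52)],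
  [((1, 1, 3), 7), ((2, 1, 3), 7), ((3, 1, 3), 7), ((0, 0, 3), 28), ((0, 2, 3), 28), ((0, 3, 3), 28), ((0, 1, 0), 33), ((0, 1, 1), 33), ((0, 1, 2), 33), ((1, 1, 2), 61), ((2, 1, 1), 61), ((3, 1, 0), 61)],
  [((1, 2, 0), 8), ((2, 2, 0), 8), ((3, 2, 0), 8), ((0, 0, 0), 16), ((0, 1, 0), 16), ((0, 3, 0), 16), ((0, 2, 1), 34), ((0, 2, 2), 34), ((0, 2, 3), 34), ((1, 2, 1), 58), ((2, 2, 2), 58), ((3, 2, 3), 58)],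
  [((1, 2, 1), 9), ((2, 2, 1), 9), ((3, 2, 1), 9), ((0, 0, 1), 20), ((0, 1, 1), 20), ((0, 3, 1), 20), ((0, 2, 0), 34), ((0, 2, 2), 34), ((0, 2, 3), 34), ((0, 0, 3), 52), ((0, 1, 2), 52), ((0, 3, 0), 52)],
  [((1, 2, 2), 10), ((2, 2, 2), 10), ((3, 2, 2), 10), ((0, 0, 2), 24), ((0, 1, 2), 24), ((0, 3, 2), 24), ((0, 2, 0), 34), ((0, 2, 1), 34), ((0, 2, 3), 34), ((0, 0, 0), 48), ((0, 1, 1), 48), ((0, 3, 3), 48)],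
  [((1, 2, 3), 11), ((2, 2, 3), 11), ((3, 2, 3), 11), ((0, 0, 3), 28), ((0, 1, 3), 28), ((0, 3, 3), 28), ((0, 2, 0), 34), ((0, 2, 1), 34), ((0, 2, 2), 34), ((1, 2, 2), 62), ((2, 2, 1), 62), ((3, 2, 0), 62)],
  [((1, 3, 0), 12), ((2, 3, 0), 12), ((3, 3, 0), 12), ((0, 0, 0), 16), ((0, 1, 0), 16), ((0, 2, 0), 16), ((0, 3, 1), 35), ((0, 3, 2), 35), ((0, 3, 3), 35), ((0, 0, 3), 52), ((0, 1, 2), 52), ((0, 2, 1), 52), ((1, 3, 1), 59), ((2, 3, 2), 59), ((3, 3, 3), 59), ((1, 2, 0), 68), ((2, 1, 0), 68), ((3, 0, 0), 68), ((1, 2, 1), 74), ((2, 1, 2), 74), ((3, 0, 3), 74)],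
  [((1, 3, 1), 13), ((2, 3, 1), 13), ((3, 3, 1), 13), ((0, 0, 1), 20), ((0, 1, 1), 20), ((0, 2, 1), 20), ((0, 3, 0), 35), ((0, 3, 2), 35), ((0, 3, 3), 35), ((1, 2, 1), 69), ((2, 1, 1), 69), ((3, 0, 1), 69)],
  [((1, 3, 2), 14), ((2, 3, 2), 14), ((3, 3, 2), 14), ((0, 0, 2), 24), ((0, 1, 2), 24), ((0, 2, 2), 24), ((0, 3, 0), 35), ((0, 3, 1), 35), ((0, 3, 3), 35), ((1, 2, 2), 70), ((2, 1, 2), 70), ((3, 0, 2), 70)],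
  [((1, 3, 3), 15), ((2, 3, 3), 15), ((3, 3, 3), 15), ((0, 0, 3), 28), ((0, 1, 3), 28), ((0, 2, 3), 28), ((0, 3, 0), 35), ((0, 3, 1), 35), ((0, 3, 2), 35), ((0, 0, 0), 48), ((0, 1, 1), 48), ((0, 2, 2), 48), ((1, 3, 2), 63), ((2, 3, 1), 63), ((3, 3, 0), 63), ((1, 2, 3), 71), ((2, 1, 3), 71), ((3, 0, 3), 71), ((1, 2, 2), 75), ((2, 1, 1), 75), ((3, 0, 0), 75)],
  [((0, 0, 0), 0), ((2, 0, 0), 0), ((3, 0, 0), 0), ((1, 1, 0), 17), ((1, 2, 0), 17), ((1, 3, 0), 17), ((1, 0, 1), 36), ((1, 0, 2), 36), ((1, 0, 3), 36), ((1, 1, 1), 49), ((1, 2, 2), 49), ((1, 3, 3), 49)],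
  [((0, 0, 1), 1), ((2, 0, 1), 1), ((3, 0, 1), 1), ((1, 1, 1), 21), ((1, 2, 1), 21), ((1, 3, 1), 21), ((1, 0, 0), 36), ((1, 0, 2), 36), ((1, 0, 3), 36), ((0, 0, 0), 56), ((2, 0, 2), 56), ((3, 0, 3), 56)],
  [((0, 0, 2), 2), ((2, 0, 2), 2), ((3, 0, 2), 2), ((1, 1, 2), 25), ((1, 2, 2), 25), ((1, 3, 2), 25), ((1, 0, 0), 36), ((1, 0, 1), 36), ((1, 0, 3), 36), ((0, 0, 3), 60), ((2, 0, 1), 60), ((3, 0, 0), 60)],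
  [((0, 0, 3), 3), ((2, 0, 3), 3), ((3, 0, 3), 3), ((1, 1, 3), 29), ((1, 2, 3), 29), ((1, 3, 3), 29), ((1, 0, 0), 36), ((1, 0, 1), 36), ((1, 0, 2), 36), ((1, 1, 2), 53), ((1, 2, 1), 53), ((1, 3, 0), 53)],
  [((0, 1, 0), 4), ((2, 1, 0), 4), ((3, 1, 0), 4), ((1, 0, 0), 17), ((1, 2, 0), 17), ((1, 3, 0), 17), ((1, 1, 1), 37), ((1, 1, 2), 37), ((1, 1, 3), 37), ((0, 0, 0), 64), ((2, 2, 0), 64), ((3, 3, 0), 64)],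
  [((0, 1, 1), 5), ((2, 1, 1), 5), ((3, 1, 1), 5), ((1, 0, 1), 21), ((1, 2, 1), 21), ((1, 3, 1), 21), ((1, 1, 0), 37), ((1, 1, 2), 37), ((1, 1, 3), 37), ((1, 0, 0), 49), ((1, 2, 2), 49), ((1, 3, 3), 49), ((0, 1, 0), 57), ((2, 1, 2), 57), ((3, 1, 3), 57), ((0, 0, 1), 65), ((2, 2, 1), 65), ((3, 3, 1), 65), ((0, 0, 0), 72), ((2, 2, 2), 72), ((3, 3, 3), 72)],
  [((0, 1, 2), 6), ((2, 1, 2), 6), ((3, 1, 2), 6), ((1, 0, 2), 25), ((1, 2, 2), 25), ((1, 3, 2), 25), ((1, 1, 0), 37), ((1, 1, 1), 37), ((1, 1, 3), 37), ((1, 0, 3), 53), ((1, 2, 1), 53), ((1, 3, 0), 53), ((0, 1, 3), 61), ((2, 1, 1), 61), ((3, 1, 0), 61), ((0, 0, 2), 66), ((2, 2, 2), 66), ((3, 3, 2), 66), ((0, 0, 3), 73), ((2, 2, 1), 73), ((3, 3, 0), 73)],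
  [((0, 1, 3), 7), ((2, 1, 3), 7), ((3, 1, 3), 7), ((1, 0, 3), 29), ((1, 2, 3), 29), ((1, 3, 3), 29), ((1, 1, 0), 37), ((1, 1, 1), 37), ((1, 1, 2), 37), ((0, 0, 3), 67), ((2, 2, 3), 67), ((3, 3, 3), 67)],
  [((0, 2, 0), 8), ((2, 2, 0), 8), ((3, 2, 0), 8), ((1, 0, 0), 17), ((1, 1, 0), 17), ((1, 3, 0), 17), ((1, 2, 1), 38), ((1, 2, 2), 38), ((1, 2, 3), 38), ((0, 3, 0), 68), ((2, 1, 0), 68), ((3, 0, 0), 68)],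
  [((0, 2, 1), 9), ((2, 2, 1), 9), ((3, 2, 1), 9), ((1, 0, 1), 21), ((1, 1, 1), 21), ((1, 3, 1), 21), ((1, 2, 0), 38), ((1, 2, 2), 38), ((1, 2, 3), 38), ((1, 0, 3), 53), ((1, 1, 2), 53), ((1, 3, 0), 53), ((0, 2, 0), 58), ((2, 2, 2), 58), ((3, 2, 3), 58), ((0, 3, 1), 69), ((2, 1, 1), 69), ((3, 0, 1), 69), ((0, 3, 0), 74), ((2, 1, 2), 74), ((3, 0, 3), 74)],
  [((0, 2, 2), 10), ((2, 2, 2), 10), ((3, 2, 2), 10), ((1, 0, 2), 25), ((1, 1, 2), 25), ((1, 3, 2), 25), ((1, 2, 0), 38), ((1, 2, 1), 38), ((1, 2, 3), 38), ((1, 0, 0), 49), ((1, 1, 1), 49), ((1, 3, 3), 49), ((0, 2, 3), 62), ((2, 2, 1), 62), ((3, 2, 0), 62), ((0, 3, 2), 70), ((2, 1, 2), 70), ((3, 0, 2), 70), ((0, 3, 3), 75), ((2, 1, 1), 75), ((3, 0, 0), 75)],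
  [((0, 2, 3), 11), ((2, 2, 3), 11), ((3, 2, 3), 11), ((1, 0, 3), 29), ((1, 1, 3), 29), ((1, 3, 3), 29), ((1, 2, 0), 38), ((1, 2, 1), 38), ((1, 2, 2), 38), ((0, 3, 3), 71), ((2, 1, 3), 71), ((3, 0, 3), 71)],
  [((0, 3, 0), 12), ((2, 3, 0), 12), ((3, 3, 0), 12), ((1, 0, 0), 17), ((1, 1, 0), 17), ((1, 2, 0), 17), ((1, 3, 1), 39), ((1, 3, 2), 39), ((1, 3, 3), 39), ((1, 0, 3), 53), ((1, 1, 2), 53), ((1, 2, 1), 53)],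
  [((0, 3, 1), 13), ((2, 3, 1), 13), ((3, 3, 1), 13), ((1, 0, 1), 21), ((1, 1, 1), 21), ((1, 2, 1), 21), ((1, 3, 0), 39), ((1, 3, 2), 39), ((1, 3, 3), 39), ((0, 3, 0), 59), ((2, 3, 2), 59), ((3, 3, 3), 59)],
  [((0, 3, 2), 14), ((2, 3, 2), 14), ((3, 3, 2), 14), ((1, 0, 2), 25), ((1, 1, 2), 25), ((1, 2, 2), 25), ((1, 3, 0), 39), ((1, 3, 1), 39), ((1, 3, 3), 39), ((0, 3, 3), 63), ((2, 3, 1), 63), ((3, 3, 0), 63)],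
  [((0, 3, 3), 15), ((2, 3, 3), 15), ((3, 3, 3), 15), ((1, 0, 3), 29), ((1, 1, 3), 29), ((1, 2, 3), 29), ((1, 3, 0), 39), ((1, 3, 1), 39), ((1, 3, 2), 39), ((1, 0, 0), 49), ((1, 1, 1), 49), ((1, 2, 2), 49)],
  [((0, 0, 0), 0), ((1, 0, 0), 0), ((3, 0, 0), 0), ((2, 1, 0), 18), ((2, 2, 0), 18), ((2, 3, 0), 18), ((2, 0, 1), 40), ((2, 0, 2), 40), ((2, 0, 3), 40), ((2, 1, 1), 50), ((2, 2, 2), 50), ((2, 3, 3), 50)],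
  [((0, 0, 1), 1), ((1, 0, 1), 1), ((3, 0, 1), 1), ((2, 1, 1), 22), ((2, 2, 1), 22), ((2, 3, 1), 22), ((2, 0, 0), 40), ((2, 0, 2), 40), ((2, 0, 3), 40), ((0, 0, 3), 60), ((1, 0, 2), 60), ((3, 0, 0), 60)],
  [((0, 0, 2), 2), ((1, 0, 2), 2), ((3, 0, 2), 2), ((2, 1, 2), 26), ((2, 2, 2), 26), ((2, 3, 2), 26), ((2, 0, 0), 40), ((2, 0, 1), 40), ((2, 0, 3), 40), ((0, 0, 0), 56), ((1, 0, 1), 56), ((3, 0, 3), 56)],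
  [((0, 0, 3), 3), ((1, 0, 3), 3), ((3, 0, 3), 3), ((2, 1, 3), 30), ((2, 2, 3), 30), ((2, 3, 3), 30), ((2, 0, 0), 40), ((2, 0, 1), 40), ((2, 0, 2), 40), ((2, 1, 2), 54), ((2, 2, 1), 54), ((2, 3, 0), 54)],
  [((0, 1, 0), 4), ((1, 1, 0), 4), ((3, 1, 0), 4), ((2, 0, 0), 18), ((2, 2, 0), 18), ((2, 3, 0), 18), ((2, 1, 1), 41), ((2, 1, 2), 41), ((2, 1, 3), 41), ((0, 3, 0), 68), ((1, 2, 0), 68), ((3, 0, 0), 68)],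
  [((0, 1, 1), 5), ((1, 1, 1), 5), ((3, 1, 1), 5), ((2, 0, 1), 22), ((2, 2, 1), 22), ((2, 3, 1), 22), ((2, 1, 0), 41), ((2, 1, 2), 41), ((2, 1, 3), 41), ((2, 0, 0), 50), ((2, 2, 2), 50), ((2, 3, 3), 50), ((0, 1, 3), 61), ((1, 1, 2), 61), ((3, 1, 0), 61), ((0, 3, 1), 69), ((1, 2, 1), 69), ((3, 0, 1), 69), ((0, 3, 3), 75), ((1, 2, 2), 75), ((3, 0, 0), 75)],
  [((0, 1, 2), 6), ((1, 1, 2), 6), ((3, 1, 2), 6), ((2, 0, 2), 26), ((2, 2, 2), 26), ((2, 3, 2), 26), ((2, 1, 0), 41), ((2, 1, 1), 41), ((2, 1, 3), 41), ((2, 0, 3), 54), ((2, 2, 1), 54), ((2, 3, 0), 54), ((0, 1, 0), 57), ((1, 1, 1), 57), ((3, 1, 3), 57), ((0, 3, 2), 70), ((1, 2, 2), 70), ((3, 0, 2), 70), ((0, 3, 0), 74), ((1, 2, 1), 74), ((3, 0, 3), 74)],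
  [((0, 1, 3), 7), ((1, 1, 3), 7), ((3, 1, 3), 7), ((2, 0, 3), 30), ((2, 2, 3), 30), ((2, 3, 3), 30), ((2, 1, 0), 41), ((2, 1, 1), 41), ((2, 1, 2), 41), ((0, 3, 3), 71), ((1, 2, 3), 71), ((3, 0, 3), 71)],
  [((0, 2, 0), 8), ((1, 2, 0), 8), ((3, 2, 0), 8), ((2, 0, 0), 18), ((2, 1, 0), 18), ((2, 3, 0), 18), ((2, 2, 1), 42), ((2, 2, 2), 42), ((2, 2, 3), 42), ((0, 0, 0), 64), ((1, 1, 0), 64), ((3, 3, 0), 64)],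
  [((0, 2, 1), 9), ((1, 2, 1), 9), ((3, 2, 1), 9), ((2, 0, 1), 22), ((2, 1, 1), 22), ((2, 3, 1), 22), ((2, 2, 0), 42), ((2, 2, 2), 42), ((2, 2, 3), 42), ((2, 0, 3), 54), ((2, 1, 2), 54), ((2, 3, 0), 54), ((0, 2, 3), 62), ((1, 2, 2), 62), ((3, 2, 0), 62), ((0, 0, 1), 65), ((1, 1, 1), 65), ((3, 3, 1), 65), ((0, 0, 3), 73), ((1, 1, 2), 73), ((3, 3, 0), 73)],
  [((0, 2, 2), 10), ((1, 2, 2), 10), ((3, 2, 2), 10), ((2, 0, 2), 26), ((2, 1, 2), 26), ((2, 3, 2), 26), ((2, 2, 0), 42), ((2, 2, 1), 42), ((2, 2, 3), 42), ((2, 0, 0), 50), ((2, 1, 1), 50), ((2, 3, 3), 50), ((0, 2, 0), 58), ((1, 2, 1), 58), ((3, 2, 3), 58), ((0, 0, 2), 66), ((1, 1, 2), 66), ((3, 3, 2), 66), ((0, 0, 0), 72), ((1, 1, 1), 72), ((3, 3, 3), 72)],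
  [((0, 2, 3), 11), ((1, 2, 3), 11), ((3, 2, 3), 11), ((2, 0, 3), 30), ((2, 1, 3), 30), ((2, 3, 3), 30), ((2, 2, 0), 42), ((2, 2, 1), 42), ((2, 2, 2), 42), ((0, 0, 3), 67), ((1, 1, 3), 67), ((3, 3, 3), 67)],
  [((0, 3, 0), 12), ((1, 3, 0), 12), ((3, 3, 0), 12), ((2, 0, 0), 18), ((2, 1, 0), 18), ((2, 2, 0), 18), ((2, 3, 1), 43), ((2, 3, 2), 43), ((2, 3, 3), 43), ((2, 0, 3), 54), ((2, 1, 2), 54), ((2, 2, 1), 54)],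
  [((0, 3, 1), 13), ((1, 3, 1), 13), ((3, 3, 1), 13), ((2, 0, 1), 22), ((2, 1, 1), 22), ((2, 2, 1), 22), ((2, 3, 0), 43), ((2, 3, 2), 43), ((2, 3, 3), 43), ((0, 3, 3), 63), ((1, 3, 2), 63), ((3, 3, 0), 63)],
  [((0, 3, 2), 14), ((1, 3, 2), 14), ((3, 3, 2), 14), ((2, 0, 2), 26), ((2, 1, 2), 26), ((2, 2, 2), 26), ((2, 3, 0), 43), ((2, 3, 1), 43), ((2, 3, 3), 43), ((0, 3, 0), 59), ((1, 3, 1), 59), ((3, 3, 3), 59)],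
  [((0, 3, 3), 15), ((1, 3, 3), 15), ((3, 3, 3), 15), ((2, 0, 3), 30), ((2, 1, 3), 30), ((2, 2, 3), 30), ((2, 3, 0), 43), ((2, 3, 1), 43), ((2, 3, 2), 43), ((2, 0, 0), 50), ((2, 1, 1), 50), ((2, 2, 2), 50)],
  [((0, 0, 0), 0), ((1, 0, 0), 0), ((2, 0, 0), 0), ((3, 1, 0), 19), ((3, 2, 0), 19), ((3, 3, 0), 19), ((3, 0, 1), 44), ((3, 0, 2), 44), ((3, 0, 3), 44), ((3, 1, 1), 51), ((3, 2, 2), 51), ((3, 3, 3), 51), ((0, 0, 3), 60), ((1, 0, 2), 60), ((2, 0, 1), 60), ((0, 3, 0), 68), ((1, 2, 0), 68), ((2, 1, 0), 68), ((0, 3, 3), 75), ((1, 2, 2), 75), ((2, 1, 1), 75)],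
  [((0, 0, 1), 1), ((1, 0, 1), 1), ((2, 0, 1), 1), ((3, 1, 1), 23), ((3, 2, 1), 23), ((3, 3, 1), 23), ((3, 0, 0), 44), ((3, 0, 2), 44), ((3, 0, 3), 44), ((0, 3, 1), 69), ((1, 2, 1), 69), ((2, 1, 1), 69)],
  [((0, 0, 2), 2), ((1, 0, 2), 2), ((2, 0, 2), 2), ((3, 1, 2), 27), ((3, 2, 2), 27), ((3, 3, 2), 27), ((3, 0, 0), 44), ((3, 0, 1), 44), ((3, 0, 3), 44), ((0, 3, 2), 70), ((1, 2, 2), 70), ((2, 1, 2), 70)],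
  [((0, 0, 3), 3), ((1, 0, 3), 3), ((2, 0, 3), 3), ((3, 1, 3), 31), ((3, 2, 3), 31), ((3, 3, 3), 31), ((3, 0, 0), 44), ((3, 0, 1), 44), ((3, 0, 2), 44), ((3, 1, 2), 55), ((3, 2, 1), 55), ((3, 3, 0), 55), ((0, 0, 0), 56), ((1, 0, 1), 56), ((2, 0, 2), 56), ((0, 3, 3), 71), ((1, 2, 3), 71), ((2, 1, 3), 71), ((0, 3, 0), 74), ((1, 2, 1), 74), ((2, 1, 2), 74)],
  [((0, 1, 0), 4), ((1, 1, 0), 4), ((2, 1, 0), 4), ((3, 0, 0), 19), ((3, 2, 0), 19), ((3, 3, 0), 19), ((3, 1, 1), 45), ((3, 1, 2), 45), ((3, 1, 3), 45), ((0, 1, 3), 61), ((1, 1, 2), 61), ((2, 1, 1), 61)],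
  [((0, 1, 1), 5), ((1, 1, 1), 5), ((2, 1, 1), 5), ((3, 0, 1), 23), ((3, 2, 1), 23), ((3, 3, 1), 23), ((3, 1, 0), 45), ((3, 1, 2), 45), ((3, 1, 3), 45), ((3, 0, 0), 51), ((3, 2, 2), 51), ((3, 3, 3), 51)],
  [((0, 1, 2), 6), ((1, 1, 2), 6), ((2, 1, 2), 6), ((3, 0, 2), 27), ((3, 2, 2), 27), ((3, 3, 2), 27), ((3, 1, 0), 45), ((3, 1, 1), 45), ((3, 1, 3), 45), ((3, 0, 3), 55), ((3, 2, 1), 55), ((3, 3, 0), 55)],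
  [((0, 1, 3), 7), ((1, 1, 3), 7), ((2, 1, 3), 7), ((3, 0, 3), 31), ((3, 2, 3), 31), ((3, 3, 3), 31), ((3, 1, 0), 45), ((3, 1, 1), 45), ((3, 1, 2), 45), ((0, 1, 0), 57), ((1, 1, 1), 57), ((2, 1, 2), 57)],
  [((0, 2, 0), 8), ((1, 2, 0), 8), ((2, 2, 0), 8), ((3, 0, 0), 19), ((3, 1, 0), 19), ((3, 3, 0), 19), ((3, 2, 1), 46), ((3, 2, 2), 46), ((3, 2, 3), 46), ((0, 2, 3), 62), ((1, 2, 2), 62), ((2, 2, 1), 62)],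
  [((0, 2, 1), 9), ((1, 2, 1), 9), ((2, 2, 1), 9), ((3, 0, 1), 23), ((3, 1, 1), 23), ((3, 3, 1), 23), ((3, 2, 0), 46), ((3, 2, 2), 46), ((3, 2, 3), 46), ((3, 0, 3), 55), ((3, 1, 2), 55), ((3, 3, 0), 55)],
  [((0, 2, 2), 10), ((1, 2, 2), 10), ((2, 2, 2), 10), ((3, 0, 2), 27), ((3, 1, 2), 27), ((3, 3, 2), 27), ((3, 2, 0), 46), ((3, 2, 1), 46), ((3, 2, 3), 46), ((3, 0, 0), 51), ((3, 1, 1), 51), ((3, 3, 3), 51)],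
  [((0, 2, 3), 11), ((1, 2, 3), 11), ((2, 2, 3), 11), ((3, 0, 3), 31), ((3, 1, 3), 31), ((3, 3, 3), 31), ((3, 2, 0), 46), ((3, 2, 1), 46), ((3, 2, 2), 46), ((0, 2, 0), 58), ((1, 2, 1), 58), ((2, 2, 2), 58)],
  [((0, 3, 0), 12), ((1, 3, 0), 12), ((2, 3, 0), 12), ((3, 0, 0), 19), ((3, 1, 0), 19), ((3, 2, 0), 19), ((3, 3, 1), 47), ((3, 3, 2), 47), ((3, 3, 3), 47), ((3, 0, 3), 55), ((3, 1, 2), 55), ((3, 2, 1), 55), ((0, 3, 3), 63), ((1, 3, 2), 63), ((2, 3, 1), 63), ((0, 0, 0), 64), ((1, 1, 0), 64), ((2, 2, 0), 64), ((0, 0, 3), 73), ((1, 1, 2), 73), ((2, 2, 1), 73)],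
  [((0, 3, 1), 13), ((1, 3, 1), 13), ((2, 3, 1), 13), ((3, 0, 1), 23), ((3, 1, 1), 23), ((3, 2, 1), 23), ((3, 3, 0), 47), ((3, 3, 2), 47), ((3, 3, 3), 47), ((0, 0, 1), 65), ((1, 1, 1), 65), ((2, 2, 1), 65)],
  [((0, 3, 2), 14), ((1, 3, 2), 14), ((2, 3, 2), 14), ((3, 0, 2), 27), ((3, 1, 2), 27), ((3, 2, 2), 27), ((3, 3, 0), 47), ((3, 3, 1), 47), ((3, 3, 3), 47), ((0, 0, 2), 66), ((1, 1, 2), 66), ((2, 2, 2), 66)],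
  [((0, 3, 3), 15), ((1, 3, 3), 15), ((2, 3, 3), 15), ((3, 0, 3), 31), ((3, 1, 3), 31), ((3, 2, 3), 31), ((3, 3, 0), 47), ((3, 3, 1), 47), ((3, 3, 2), 47), ((3, 0, 0), 51), ((3, 1, 1), 51), ((3, 2, 2), 51), ((0, 3, 0), 59), ((1, 3, 1), 59), ((2, 3, 2), 59), ((0, 0, 3), 67), ((1, 1, 3), 67), ((2, 2, 3), 67), ((0, 0, 0), 72), ((1, 1, 1), 72), ((2, 2, 2), 72)]]

def pvAltLit (p1 : Int × Int × Int) (p2 : Int × Int × Int) : Int :=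
  if p1 = p2 then -1
  else if [p1.1, p1.2.1, p1.2.2, p2.1, p2.2.1, p2.2.2].any (fun v => v < 0 || v > 3) then -1
  else
    match PySem.List.pyGet? pvByPointLit (16 * p1.1 + 4 * p1.2.1 + p1.2.2) with
    | some entries => pvScan entries p2
    | none => -1

set_option maxRecDepth 100000 in
theorem pv_by_point_lit : pvByPointLit = pvByPoint := by decide

theorem pv_alt_lit (p1 p2 : Int × Int × Int) : pointsToLine_alt p1 p2 = pvAltLit p1 p2 := by
  unfold pointsToLine_alt pvAltLit
  rw [pv_by_point_lit]

-- the 64 points of the cube, for the exhaustive check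
def pvCube : List (Int × Int × Int) := [(0, 0, 0), (0, 0, 1), (0, 0, 2), (0, 0, 3), (0, 1, 0), (0, 1, 1), (0, 1, 2), (0, 1, 3), (0, 2, 0), (0, 2, 1), (0, 2, 2), (0, 2, 3), (0, 3, 0), (0, 3, 1), (0, 3, 2), (0, 3, 3), (1, 0, 0), (1, 0, 1), (1, 0, 2), (1, 0, 3), (1, 1, 0), (1, 1, 1), (1, 1, 2), (1, 1, 3), (1, 2, 0), (1, 2, 1), (1, 2, 2), (1, 2, 3), (1, 3, 0), (1, 3, 1), (1, 3, 2), (1, 3, 3), (2, 0, 0), (2, 0, 1), (2, 0, 2), (2, 0, 3), (2, 1, 0), (2, 1, 1), (2, 1, 2), (2, 1, 3), (2, 2, 0), (2, 2, 1), (2, 2, 2), (2, 2, 3), (2, 3, 0), (2, 3, 1), (2, 3, 2), (2, 3, 3), (3, 0, 0), (3, 0, 1), (3, 0, 2), (3, 0, 3), (3, 1, 0), (3, 1, 1), (3, 1, 2), (3, 1, 3), (3, 2, 0), (3, 2, 1), (3, 2, 2), (3, 2, 3), (3, 3, 0), (3, 3, 1), (3, 3, 2), (3, 3, 3)]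

theorem pv_row_0 : (pvCube.all fun p2 => pointsToLine (0, 0, 0) p2 == pvAltLit (0, 0, 0) p2) = true := by decide
theorem pv_row_1 : (pvCube.all fun p2 => pointsToLine (0, 0, 1) p2 == pvAltLit (0, 0, 1) p2) = true := by decide
theorem pv_row_2 : (pvCube.all fun p2 => pointsToLine (0, 0, 2) p2 == pvAltLit (0, 0, 2) p2) = true := by decide
theorem pv_row_3 : (pvCube.all fun p2 => pointsToLine (0, 0, 3) p2 == pvAltLit (0, 0, 3) p2) = true := by decide
theorem pv_row_4 : (pvCube.all fun p2 => pointsToLine (0, 1, 0) p2 == pvAltLit (0, 1, 0) p2) = true := by decide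
theorem pv_row_5 : (pvCube.all fun p2 => pointsToLine (0, 1, 1) p2 == pvAltLit (0, 1, 1) p2) = true := by decide
theorem pv_row_6 : (pvCube.all fun p2 => pointsToLine (0, 1, 2) p2 == pvAltLit (0, 1, 2) p2) = true := by decide
theorem pv_row_7 : (pvCube.all fun p2 => pointsToLine (0, 1, 3) p2 == pvAltLit (0, 1, 3) p2) = true := by decide
theorem pv_row_8 : (pvCube.all fun p2 => pointsToLine (0, 2, 0) p2 == pvAltLit (0, 2, 0) p2) = true := by decide
theorem pv_row_9 : (pvCube.all fun p2 => pointsToLine (0, 2, 1) p2 == pvAltLit (0, 2, 1) p2) = true := by decide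
theorem pv_row_10 : (pvCube.all fun p2 => pointsToLine (0, 2, 2) p2 == pvAltLit (0, 2, 2) p2) = true := by decide
theorem pv_row_11 : (pvCube.all fun p2 => pointsToLine (0, 2, 3) p2 == pvAltLit (0, 2, 3) p2) = true := by decide
theorem pv_row_12 : (pvCube.all fun p2 => pointsToLine (0, 3, 0) p2 == pvAltLit (0, 3, 0) p2) = true := by decide
theorem pv_row_13 : (pvCube.all fun p2 => pointsToLine (0, 3, 1) p2 == pvAltLit (0, 3, 1) p2) = true := by decide
theorem pv_row_14 : (pvCube.all fun p2 => pointsToLine (0, 3, 2) p2 == pvAltLit (0, 3, 2) p2) = true := by decide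
theorem pv_row_15 : (pvCube.all fun p2 => pointsToLine (0, 3, 3) p2 == pvAltLit (0, 3, 3) p2) = true := by decide
theorem pv_row_16 : (pvCube.all fun p2 => pointsToLine (1, 0, 0) p2 == pvAltLit (1, 0, 0) p2) = true := by decide
theorem pv_row_17 : (pvCube.all fun p2 => pointsToLine (1, 0, 1) p2 == pvAltLit (1, 0, 1) p2) = true := by decide
theorem pv_row_18 : (pvCube.all fun p2 => pointsToLine (1, 0, 2) p2 == pvAltLit (1, 0, 2) p2) = true := by decide
theorem pv_row_19 : (pvCube.all fun p2 => pointsToLine (1, 0, 3) p2 == pvAltLit (1, 0, 3) p2) = true := by decide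
theorem pv_row_20 : (pvCube.all fun p2 => pointsToLine (1, 1, 0) p2 == pvAltLit (1, 1, 0) p2) = true := by decide
theorem pv_row_21 : (pvCube.all fun p2 => pointsToLine (1, 1, 1) p2 == pvAltLit (1, 1, 1) p2) = true := by decide
theorem pv_row_22 : (pvCube.all fun p2 => pointsToLine (1, 1, 2) p2 == pvAltLit (1, 1, 2) p2) = true := by decide
theorem pv_row_23 : (pvCube.all fun p2 => pointsToLine (1, 1, 3) p2 == pvAltLit (1, 1, 3) p2) = true := by decide
theorem pv_row_24 : (pvCube.all fun p2 => pointsToLine (1, 2, 0) p2 == pvAltLit (1, 2, 0) p2) = true := by decide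
theorem pv_row_25 : (pvCube.all fun p2 => pointsToLine (1, 2, 1) p2 == pvAltLit (1, 2, 1) p2) = true := by decide
theorem pv_row_26 : (pvCube.all fun p2 => pointsToLine (1, 2, 2) p2 == pvAltLit (1, 2, 2) p2) = true := by decide
theorem pv_row_27 : (pvCube.all fun p2 => pointsToLine (1, 2, 3) p2 == pvAltLit (1, 2, 3) p2) = true := by decide
theorem pv_row_28 : (pvCube.all fun p2 => pointsToLine (1, 3, 0) p2 == pvAltLit (1, 3, 0) p2) = true := by decide
theorem pv_row_29 : (pvCube.all fun p2 => pointsToLine (1, 3, 1) p2 == pvAltLit (1, 3, 1) p2) = true := by decide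
theorem pv_row_30 : (pvCube.all fun p2 => pointsToLine (1, 3, 2) p2 == pvAltLit (1, 3, 2) p2) = true := by decide
theorem pv_row_31 : (pvCube.all fun p2 => pointsToLine (1, 3, 3) p2 == pvAltLit (1, 3, 3) p2) = true := by decide
theorem pv_row_32 : (pvCube.all fun p2 => pointsToLine (2, 0, 0) p2 == pvAltLit (2, 0, 0) p2) = true := by decide
theorem pv_row_33 : (pvCube.all fun p2 => pointsToLine (2, 0, 1) p2 == pvAltLit (2, 0, 1) p2) = true := by decide
theorem pv_row_34 : (pvCube.all fun p2 => pointsToLine (2, 0, 2) p2 == pvAltLit (2, 0, 2) p2) = true := by decide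
theorem pv_row_35 : (pvCube.all fun p2 => pointsToLine (2, 0, 3) p2 == pvAltLit (2, 0, 3) p2) = true := by decide
theorem pv_row_36 : (pvCube.all fun p2 => pointsToLine (2, 1, 0) p2 == pvAltLit (2, 1, 0) p2) = true := by decide
theorem pv_row_37 : (pvCube.all fun p2 => pointsToLine (2, 1, 1) p2 == pvAltLit (2, 1, 1) p2) = true := by decide
theorem pv_row_38 : (pvCube.all fun p2 => pointsToLine (2, 1, 2) p2 == pvAltLit (2, 1, 2) p2) = true := by decide
theorem pv_row_39 : (pvCube.all fun p2 => pointsToLine (2, 1, 3) p2 == pvAltLit (2, 1, 3) p2) = true := by decide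
theorem pv_row_40 : (pvCube.all fun p2 => pointsToLine (2, 2, 0) p2 == pvAltLit (2, 2, 0) p2) = true := by decide
theorem pv_row_41 : (pvCube.all fun p2 => pointsToLine (2, 2, 1) p2 == pvAltLit (2, 2, 1) p2) = true := by decide
theorem pv_row_42 : (pvCube.all fun p2 => pointsToLine (2, 2, 2) p2 == pvAltLit (2, 2, 2) p2) = true := by decide
theorem pv_row_43 : (pvCube.all fun p2 => pointsToLine (2, 2, 3) p2 == pvAltLit (2, 2, 3) p2) = true := by decide
theorem pv_row_44 : (pvCube.all fun p2 => pointsToLine (2, 3, 0) p2 == pvAltLit (2, 3, 0) p2) = true := by decide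
theorem pv_row_45 : (pvCube.all fun p2 => pointsToLine (2, 3, 1) p2 == pvAltLit (2, 3, 1) p2) = true := by decide
theorem pv_row_46 : (pvCube.all fun p2 => pointsToLine (2, 3, 2) p2 == pvAltLit (2, 3, 2) p2) = true := by decide
theorem pv_row_47 : (pvCube.all fun p2 => pointsToLine (2, 3, 3) p2 == pvAltLit (2, 3, 3) p2) = true := by decide
theorem pv_row_48 : (pvCube.all fun p2 => pointsToLine (3, 0, 0) p2 == pvAltLit (3, 0, 0) p2) = true := by decide
theorem pv_row_49 : (pvCube.all fun p2 => pointsToLine (3, 0, 1) p2 == pvAltLit (3, 0, 1) p2) = true := by decide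
theorem pv_row_50 : (pvCube.all fun p2 => pointsToLine (3, 0, 2) p2 == pvAltLit (3, 0, 2) p2) = true := by decide
theorem pv_row_51 : (pvCube.all fun p2 => pointsToLine (3, 0, 3) p2 == pvAltLit (3, 0, 3) p2) = true := by decide
theorem pv_row_52 : (pvCube.all fun p2 => pointsToLine (3, 1, 0) p2 == pvAltLit (3, 1, 0) p2) = true := by decide
theorem pv_row_53 : (pvCube.all fun p2 => pointsToLine (3, 1, 1) p2 == pvAltLit (3, 1, 1) p2) = true := by decide
theorem pv_row_54 : (pvCube.all fun p2 => pointsToLine (3, 1, 2) p2 == pvAltLit (3, 1, 2) p2) = true := by decide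
theorem pv_row_55 : (pvCube.all fun p2 => pointsToLine (3, 1, 3) p2 == pvAltLit (3, 1, 3) p2) = true := by decide
theorem pv_row_56 : (pvCube.all fun p2 => pointsToLine (3, 2, 0) p2 == pvAltLit (3, 2, 0) p2) = true := by decide
theorem pv_row_57 : (pvCube.all fun p2 => pointsToLine (3, 2, 1) p2 == pvAltLit (3, 2, 1) p2) = true := by decide
theorem pv_row_58 : (pvCube.all fun p2 => pointsToLine (3, 2, 2) p2 == pvAltLit (3, 2, 2) p2) = true := by decide
theorem pv_row_59 : (pvCube.all fun p2 => pointsToLine (3, 2, 3) p2 == pvAltLit (3, 2, 3) p2) = true := by decide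
theorem pv_row_60 : (pvCube.all fun p2 => pointsToLine (3, 3, 0) p2 == pvAltLit (3, 3, 0) p2) = true := by decide
theorem pv_row_61 : (pvCube.all fun p2 => pointsToLine (3, 3, 1) p2 == pvAltLit (3, 3, 1) p2) = true := by decide
theorem pv_row_62 : (pvCube.all fun p2 => pointsToLine (3, 3, 2) p2 == pvAltLit (3, 3, 2) p2) = true := by decide
theorem pv_row_63 : (pvCube.all fun p2 => pointsToLine (3, 3, 3) p2 == pvAltLit (3, 3, 3) p2) = true := by decide

theorem pv_cases4 (x : Int) (h0 : 0 ≤ x) (h3 : x ≤ 3) : x = 0 ∨ x = 1 ∨ x = 2 ∨ x = 3 := by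
  omega

theorem pv_all_rows : ∀ p1 ∈ pvCube, (pvCube.all fun p2 => pointsToLine p1 p2 == pvAltLit p1 p2) = true := by
  intro p1 h1
  simp only [pvCube, List.mem_cons, List.not_mem_nil, or_false] at h1
  rcases h1 with rfl|rfl|rfl|rfl|rfl|rfl|rfl|rfl|rfl|rfl|rfl|rfl|rfl|rfl|rfl|rfl|rfl|rfl|rfl|rfl|rfl|rfl|rfl|rfl|rfl|rfl|rfl|rfl|rfl|rfl|rfl|rfl|rfl|rfl|rfl|rfl|rfl|rfl|rfl|rfl|rfl|rfl|rfl|rfl|rfl|rfl|rfl|rfl|rfl|rfl|rfl|rfl|rfl|rfl|rfl|rfl|rfl|rfl|rfl|rfl|rfl|rfl|rfl|rfl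
  exacts [pv_row_0, pv_row_1, pv_row_2, pv_row_3, pv_row_4, pv_row_5, pv_row_6, pv_row_7, pv_row_8, pv_row_9, pv_row_10, pv_row_11, pv_row_12, pv_row_13, pv_row_14, pv_row_15, pv_row_16, pv_row_17, pv_row_18, pv_row_19, pv_row_20, pv_row_21, pv_row_22, pv_row_23, pv_row_24, pv_row_25, pv_row_26, pv_row_27, pv_row_28, pv_row_29, pv_row_30, pv_row_31, pv_row_32, pv_row_33, pv_row_34, pv_row_35, pv_row_36, pv_row_37, pv_row_38, pv_row_39, pv_row_40, pv_row_41, pv_row_42, pv_row_43, pv_row_44, pv_row_45, pv_row_46, pv_row_47, pv_row_48, pv_row_49, pv_row_50, pv_row_51, pv_row_52, pv_row_53, pv_row_54, pv_row_55, pv_row_56, pv_row_57, pv_row_58, pv_row_59, pv_row_60, pv_row_61, pv_row_62, pv_row_63]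

theorem pv_mem_cube (x y z : Int) (hx0 : 0 ≤ x) (hx3 : x ≤ 3) (hy0 : 0 ≤ y) (hy3 : y ≤ 3)
    (hz0 : 0 ≤ z) (hz3 : z ≤ 3) : (x, y, z) ∈ pvCube := by
  rcases pv_cases4 x hx0 hx3 with rfl | rfl | rfl | rfl <;>
    rcases pv_cases4 y hy0 hy3 with rfl | rfl | rfl | rfl <;>
      rcases pv_cases4 z hz0 hz3 with rfl | rfl | rfl | rfl <;> decide

theorem pv_in_range (p1 p2 : Int × Int × Int) (h1 : p1 ∈ pvCube) (h2 : p2 ∈ pvCube) :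
    pointsToLine p1 p2 = pointsToLine_alt p1 p2 := by
  have h := pv_all_rows p1 h1
  rw [List.all_eq_true] at h
  rw [pv_alt_lit]
  exact beq_iff_eq.mp (h p2 h2)

-- ===== VERDICT (by name: the statement is the Claim_ definition above) =====
theorem pointsToLine_spec : Claim_equal_pointsToLine := by
  intro p1 p2 _
  unfold Spec_pointsToLine
  obtain ⟨x1, y1, z1⟩ := p1
  obtain ⟨x2, y2, z2⟩ := p2
  by_cases h : ([x1, y1, z1, x2, y2, z2].any (fun v => v < 0 || v > 3)) = true
  · obtain ⟨hA, hB⟩ := pv_out_of_range (x1, y1, z1) (x2, y2, z2) h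
    rw [hA, hB]
  · simp only [List.any_cons, List.any_nil, Bool.or_eq_true, decide_eq_true_eq, not_or] at h
    exact pv_in_range (x1, y1, z1) (x2, y2, z2)
      (pv_mem_cube x1 y1 z1 (by omega) (by omega) (by omega) (by omega) (by omega) (by omega))
      (pv_mem_cube x2 y2 z2 (by omega) (by omega) (by omega) (by omega) (by omega) (by omega))
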